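-- pv_equiv track=rewrite | github.com/jskim7018/leetcode_study | algorithm_study/2026/04/20260415/easy/LC_2515.py | closestTarget
-- ===== SOURCE A (Python) =====
-- from typing import List
--
-- def closestTarget(words: List[str], target: str, startIndex: int) -> int:
--     n = len(words)
--
--     if words[startIndex] == target:
--         return 0
--
--     for i in range(1, n):
--         left = (startIndex - i + n) % n
--         right = (startIndex + i) % n
--
--         if words[left] == target or words[right] == target:
--             return i
--
--     return -1
-- ===== SOURCE B (Python) =====
-- from typing import List
--
-- def closestTarget(words: List[str], target: str, startIndex: int) -> int:
--     n = len(words)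
--     if words[startIndex] == target:
--         return 0
--     s = startIndex % n
--     best = -1
--     for i, w in enumerate(words):
--         if w == target:
--             d = abs(i - s)
--             dist = min(d, n - d)
--             if best == -1 or dist < best:
--                 best = dist
--     return best
-- ===== Notes on version B (the rewrite author's own statement) =====
-- stated objective: simpler
-- what changed: Replaces A's outward symmetric left/right ring expansion from startIndex by a single enumerate scan that takes the minimum closed-form circular distance min(d, n-d) over all occurrences of target (one index computation per element instead of two modular lookups per ring step).
-- outside the precondition, e.g. on closestTarget([], 'a', 0): A raises IndexError, B raises IndexError; on closestTarget(['a', 'b'], 'a', 3): A raises IndexError, B raises IndexError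
import Mathlib
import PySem

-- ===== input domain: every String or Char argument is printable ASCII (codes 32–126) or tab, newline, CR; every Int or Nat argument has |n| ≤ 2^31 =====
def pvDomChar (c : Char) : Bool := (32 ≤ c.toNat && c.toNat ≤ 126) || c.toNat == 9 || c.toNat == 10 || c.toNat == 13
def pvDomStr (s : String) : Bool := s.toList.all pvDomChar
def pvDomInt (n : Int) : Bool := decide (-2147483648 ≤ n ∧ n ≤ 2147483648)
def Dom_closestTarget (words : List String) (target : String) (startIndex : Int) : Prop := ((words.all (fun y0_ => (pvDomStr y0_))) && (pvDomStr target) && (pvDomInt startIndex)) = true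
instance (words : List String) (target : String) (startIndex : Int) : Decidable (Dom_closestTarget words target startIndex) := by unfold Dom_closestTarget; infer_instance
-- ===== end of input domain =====

-- B replaces A's symmetric outward left/right ring expansion by a single enumerate scan
-- taking the minimum closed-form circular distance min(d, n-d) over occurrences of target (objective: simpler).


-- ===== PORT A =====
-- the `for i in range(1, n)` loop with its early return
def closestTargetLoop (words : List String) (target : String) (startIndex n : Int) : List Int → Int
  | [] => -1
  | i :: rest =>
    let left := PySem.Int.mod (startIndex - i + n) n
    let right := PySem.Int.mod (startIndex + i) n
    if PySem.List.pyGet? words left == some target || PySem.List.pyGet? words right == some target then i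
    else closestTargetLoop words target startIndex n rest

def closestTarget (words : List String) (target : String) (startIndex : Int) : Int :=
  let n : Int := words.length
  match PySem.List.pyGet? words startIndex with
  | none => 0   -- IndexError in Python; excluded by Pre_
  | some w =>
    if w == target then 0
    else closestTargetLoop words target startIndex n (PySem.List.pyRange 1 n 1)

-- ===== PORT B =====
def closestTarget_alt (words : List String) (target : String) (startIndex : Int) : Int :=
  let n : Int := words.length
  match PySem.List.pyGet? words startIndex with
  | none => 0   -- IndexError in Python; excluded by Pre_
  | some w =>
    if w == target then 0
    else
      let s := PySem.Int.mod startIndex n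
      (PySem.List.enumerate words 0).foldl (fun best p =>
        if p.2 == target then
          let d := |p.1 - s|
          let dist := min d (n - d)
          if best == -1 || dist < best then dist else best
        else best) (-1)

-- ===== PRECONDITION & SPEC =====
-- Pre_ excludes exactly the inputs where Python's words[startIndex] raises IndexError (empty list / out-of-range index).
def Pre_closestTarget (words : List String) (target : String) (startIndex : Int) : Prop :=
  PySem.Raise.InRange words.length startIndex
instance (words : List String) (target : String) (startIndex : Int) : Decidable (Pre_closestTarget words target startIndex) := by unfold Pre_closestTarget; infer_instance

def pvWitness_closestTarget : List String × String × Int := (["a", "b", "c"], "c", -1)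

def Spec_closestTarget (words : List String) (target : String) (startIndex : Int) (out : Int) : Prop := out = closestTarget_alt words target startIndex
instance (words : List String) (target : String) (startIndex : Int) (out : Int) : Decidable (Spec_closestTarget words target startIndex out) := by unfold Spec_closestTarget; infer_instance

-- ===== CLAIM (what is proved, stated in full; the proofs are below) =====
def Claim_equal_closestTarget : Prop := ∀ (words : List String) (target : String) (startIndex : Int), Dom_closestTarget words target startIndex → Pre_closestTarget words target startIndex → Spec_closestTarget words target startIndex (closestTarget words target startIndex)

-- ===== LEMMAS AND PROOFS =====

-- B's per-index circular distance, as written in Source B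
def pvDistB (n s k : Int) : Int := min |k - s| (n - |k - s|)

-- the list of distances B minimises over
def pvDs (target : String) (n s : Int) (l : List (Int × String)) : List Int :=
  l.filterMap (fun p => if p.2 == target then some (pvDistB n s p.1) else none)

theorem pv_emod_of_bounds (a n : Int) (hn : 0 < n) (h1 : -n < a) (h2 : a < n) :
    a % n = if a < 0 then a + n else a := by
  split_ifs with h
  · have h3 : (a + n * 1) % n = a % n := Int.add_mul_emod_self_left ..
    have h4 : (a + n * 1) % n = a + n * 1 := Int.emod_eq_of_lt (by omega) (by omega)
    omega
  · exact Int.emod_eq_of_lt (by omega) h2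

theorem pv_shift_sub (x i n : Int) : (x - i + n) % n = (x % n - i) % n := by
  have h1 : (x - i + n * 1) % n = (x - i) % n := Int.add_mul_emod_self_left ..
  have h2 : (x - i) % n = (x % n - i % n) % n := Int.sub_emod ..
  have h3 : (x % n - i) % n = (x % n % n - i % n) % n := Int.sub_emod ..
  have h4 : x % n % n = x % n := Int.emod_emod_of_dvd _ dvd_rfl
  rw [h4] at h3
  rw [show x - i + n = x - i + n * 1 by ring, h1, h2, h3]

theorem pv_shift_add (x i n : Int) : (x + i) % n = (x % n + i) % n := by
  have h2 : (x + i) % n = (x % n + i % n) % n := Int.add_emod ..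
  have h3 : (x % n + i) % n = (x % n % n + i % n) % n := Int.add_emod ..
  have h4 : x % n % n = x % n := Int.emod_emod_of_dvd _ dvd_rfl
  rw [h4] at h3
  rw [h2, h3]

-- A's loop is `find?` over the range, default -1
theorem closestTargetLoop_eq_find (words : List String) (target : String) (startIndex n : Int)
    (l : List Int) :
    closestTargetLoop words target startIndex n l =
      ((l.find? (fun i => PySem.List.pyGet? words (PySem.Int.mod (startIndex - i + n) n) == some target
          || PySem.List.pyGet? words (PySem.Int.mod (startIndex + i) n) == some target)).getD (-1)) := by
  induction l with
  | nil => rfl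
  | cons i rest ih =>
    simp only [closestTargetLoop, List.find?]
    split <;> rename_i h
    · simp [h]
    · simp only [Bool.not_eq_true] at h
      simp [h, ih]

-- find? on a strictly increasing list returns the least satisfying element
theorem pv_find_sorted {p : Int → Bool} (l : List Int) (m : Int)
    (hsort : l.Pairwise (· < ·)) (hm : m ∈ l) (hpm : p m = true)
    (hlt : ∀ x ∈ l, x < m → p x = false) : l.find? p = some m := by
  induction l with
  | nil => cases hm
  | cons a t ih =>
    rcases List.pairwise_cons.mp hsort with ⟨ha, ht⟩
    rcases List.mem_cons.mp hm with rfl | hmt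
    · simp [List.find?, hpm]
    · have haf : p a = false := hlt a (List.mem_cons_self) (ha m hmt)
      simp only [List.find?, haf]
      exact ih ht hmt (fun x hx => hlt x (List.mem_cons_of_mem _ hx))

-- B's fold from a nonnegative accumulator is a fold of `min` over the distances
theorem pv_fold_ge (target : String) (n s : Int) (l : List (Int × String)) (b : Int) (hb : 0 ≤ b)
    (hpos : ∀ p ∈ l, p.2 = target → 0 ≤ pvDistB n s p.1) :
    l.foldl (fun best p =>
        if p.2 == target then
          if best == -1 || min |p.1 - s| (n - |p.1 - s|) < best then
            min |p.1 - s| (n - |p.1 - s|) else best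
        else best) b = (pvDs target n s l).foldl min b := by
  induction l generalizing b with
  | nil => rfl
  | cons p t ih =>
    by_cases h : p.2 = target
    · have hd : 0 ≤ pvDistB n s p.1 := hpos p (List.mem_cons_self) h
      have hb1 : (b == -1) = false := by simp; omega
      simp only [List.foldl_cons, pvDs, List.filterMap_cons, h, beq_self_eq_true, if_true, hb1,
        Bool.false_or]
      have hstep : (if decide (min |p.1 - s| (n - |p.1 - s|) < b) = true
          then min |p.1 - s| (n - |p.1 - s|) else b) = min b (pvDistB n s p.1) := by
        unfold pvDistB
        split_ifs with hh
        · simp only [decide_eq_true_eq] at hh; omega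
        · simp only [decide_eq_true_eq, not_lt] at hh; omega
      rw [hstep]
      rw [ih (min b (pvDistB n s p.1)) (le_min hb hd)
        (fun q hq hq' => hpos q (List.mem_cons_of_mem _ hq) hq')]
      rfl
    · have h' : (p.2 == target) = false := by simpa using h
      simp only [List.foldl_cons, pvDs, List.filterMap_cons, h', Bool.false_eq_true,
        if_false]
      exact ih b hb (fun q hq hq' => hpos q (List.mem_cons_of_mem _ hq) hq')

-- B's fold computes the minimum distance, or -1 if there is none
theorem pv_fold_min (target : String) (n s : Int) (l : List (Int × String))
    (hpos : ∀ p ∈ l, p.2 = target → 0 ≤ pvDistB n s p.1) :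
    l.foldl (fun best p =>
        if p.2 == target then
          if best == -1 || min |p.1 - s| (n - |p.1 - s|) < best then
            min |p.1 - s| (n - |p.1 - s|) else best
        else best) (-1) = ((pvDs target n s l).min?).getD (-1) := by
  induction l with
  | nil => rfl
  | cons p t ih =>
    by_cases h : p.2 = target
    · have hd : 0 ≤ pvDistB n s p.1 := hpos p (List.mem_cons_self) h
      simp only [List.foldl_cons, pvDs, List.filterMap_cons, h, beq_self_eq_true, if_true]
      have hcond : (true || decide (min |p.1 - s| (n - |p.1 - s|) < (-1 : Int))) = true := by
        simp
      rw [if_pos hcond]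
      have hge := pv_fold_ge target n s t (min |p.1 - s| (n - |p.1 - s|))
        hd (fun q hq hq' => hpos q (List.mem_cons_of_mem _ hq) hq')
      rw [hge, List.min?_cons']
      rfl
    · have h' : (p.2 == target) = false := by simpa using h
      simp only [List.foldl_cons, pvDs, List.filterMap_cons, h', Bool.false_eq_true, if_false]
      exact ih (fun q hq hq' => hpos q (List.mem_cons_of_mem _ hq) hq')

-- membership in the distance list
theorem pv_mem_ds (words : List String) (target : String) (n s d : Int)
    (hn : n = (words.length : Int)) :
    d ∈ pvDs target n s (PySem.List.enumerate words 0) ↔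
      ∃ k : Int, 0 ≤ k ∧ k < n ∧ PySem.List.pyGet? words k = some target ∧ d = pvDistB n s k := by
  constructor
  · intro hd
    rcases List.mem_filterMap.mp hd with ⟨p, hp, hpd⟩
    rcases (PySem.List.mem_enumerate_iff _ _ _).mp hp with ⟨k, hk, hpe⟩
    subst hpe
    simp only [zero_add] at hpd ⊢
    by_cases h : words[k] = target
    · refine ⟨(k : Int), by omega, by omega, ?_, ?_⟩
      · rw [PySem.List.pyGet?_natCast]
        simp [List.getElem?_eq_getElem hk, h]
      · simp only [h, beq_self_eq_true, if_true, Option.some.injEq] at hpd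
        rw [← hpd]
    · simp [h] at hpd
  · rintro ⟨k, hk0, hkn, hkt, rfl⟩
    have hkN : k.toNat < words.length := by omega
    have hkt' : words[k.toNat] = target := by
      rw [PySem.List.pyGet?_of_nonneg _ hk0, List.getElem?_eq_getElem hkN] at hkt
      exact Option.some.inj hkt
    refine List.mem_filterMap.mpr ⟨((0 : Int) + (k.toNat : Int), words[k.toNat]), ?_, ?_⟩
    · exact (PySem.List.mem_enumerate_iff _ _ _).mpr ⟨k.toNat, hkN, rfl⟩
    · simp only [hkt', beq_self_eq_true, if_true, Option.some.injEq]
      have hkk : (0 : Int) + (k.toNat : Int) = k := by omega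
      rw [hkk]

-- the central arithmetic fact: an index is at ring offset ±i from s iff its circular distance matches
theorem pv_dist_eq (n s k i : Int) (hn : 0 < n) (hs0 : 0 ≤ s) (hsn : s < n)
    (hk0 : 0 ≤ k) (hkn : k < n) (hi1 : 1 ≤ i) (hin : i < n) :
    (k = (s - i) % n ∨ k = (s + i) % n) ↔ pvDistB n s k = min i (n - i) := by
  have e1 : (s - i) % n = if s - i < 0 then s - i + n else s - i :=
    pv_emod_of_bounds _ _ hn (by omega) (by omega)
  have e2 : (s + i) % n = if n ≤ s + i then s + i - n else s + i := by
    by_cases hni : n ≤ s + i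
    · rw [if_pos hni]
      have h3 : (s + i - n + n * 1) % n = (s + i - n) % n := Int.add_mul_emod_self_left ..
      have h4 : (s + i - n) % n = s + i - n := Int.emod_eq_of_lt (by omega) (by omega)
      have h5 : s + i - n + n * 1 = s + i := by ring
      rw [h5] at h3
      omega
    · rw [if_neg hni]
      exact Int.emod_eq_of_lt (by omega) (by omega)
  rw [e1, e2]
  unfold pvDistB
  rw [min_def, min_def]
  rcases abs_cases (k - s) with ⟨ha, ha'⟩ | ⟨ha, ha'⟩ <;> rw [ha] <;> split_ifs <;> omega

-- the hit test of A's loop, characterised by indices holding the target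
theorem pv_hit_iff (words : List String) (target : String) (startIndex n s i : Int)
    (hn : n = (words.length : Int)) (hnpos : 0 < n) (hs : s = startIndex % n) :
    ((PySem.List.pyGet? words (PySem.Int.mod (startIndex - i + n) n) == some target
      || PySem.List.pyGet? words (PySem.Int.mod (startIndex + i) n) == some target) = true) ↔
    ∃ k : Int, 0 ≤ k ∧ k < n ∧ PySem.List.pyGet? words k = some target ∧
      (k = (s - i) % n ∨ k = (s + i) % n) := by
  have hL : PySem.Int.mod (startIndex - i + n) n = (s - i) % n := by
    rw [PySem.Int.mod_eq_emod_of_pos hnpos, pv_shift_sub, ← hs]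
  have hR : PySem.Int.mod (startIndex + i) n = (s + i) % n := by
    rw [PySem.Int.mod_eq_emod_of_pos hnpos, pv_shift_add, ← hs]
  have hL0 : 0 ≤ (s - i) % n := Int.emod_nonneg _ (by omega)
  have hLn : (s - i) % n < n := Int.emod_lt_of_pos _ hnpos
  have hR0 : 0 ≤ (s + i) % n := Int.emod_nonneg _ (by omega)
  have hRn : (s + i) % n < n := Int.emod_lt_of_pos _ hnpos
  rw [hL, hR]
  simp only [Bool.or_eq_true, beq_iff_eq]
  constructor
  · rintro (h | h)
    · exact ⟨(s - i) % n, hL0, hLn, h, Or.inl rfl⟩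
    · exact ⟨(s + i) % n, hR0, hRn, h, Or.inr rfl⟩
  · rintro ⟨k, _, _, hkt, rfl | rfl⟩
    · exact Or.inl hkt
    · exact Or.inr hkt

-- Python's words[startIndex] is words[startIndex % n]
theorem pv_pyGet_emod (words : List String) (startIndex : Int)
    (h : PySem.Raise.InRange words.length startIndex) :
    PySem.List.pyGet? words startIndex =
      PySem.List.pyGet? words (startIndex % (words.length : Int)) := by
  have hb : -(words.length : Int) ≤ startIndex ∧ startIndex < (words.length : Int) := by
    simpa [PySem.Raise.InRange] using h
  have hn : (0 : Int) < (words.length : Int) := by omega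
  by_cases h0 : 0 ≤ startIndex
  · rw [Int.emod_eq_of_lt h0 hb.2]
  · have h3 : (startIndex + (words.length : Int) * 1) % (words.length : Int)
        = startIndex % (words.length : Int) := Int.add_mul_emod_self_left ..
    have h4 : (startIndex + (words.length : Int) * 1) % (words.length : Int)
        = startIndex + (words.length : Int) * 1 := Int.emod_eq_of_lt (by omega) (by omega)
    have he : startIndex % (words.length : Int) = startIndex + (words.length : Int) := by omega
    obtain ⟨k, hk, hk1, hk2⟩ : ∃ k : Nat, startIndex = -(k : Int) ∧ 0 < k ∧ k ≤ words.length :=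
      ⟨(-startIndex).toNat, by omega, by omega, by omega⟩
    subst hk
    rw [he, PySem.List.pyGet?_neg_natCast _ _ hk1 hk2, PySem.List.pyGet?_of_nonneg _ (by omega)]
    congr 1
    omega

theorem closestTarget_main (words : List String) (target : String) (startIndex : Int)
    (x : String) (hx : PySem.List.pyGet? words startIndex = some x) (hxt : x ≠ target)
    (hpre : PySem.Raise.InRange words.length startIndex) :
    closestTargetLoop words target startIndex (words.length : Int)
        (PySem.List.pyRange 1 (words.length : Int) 1) =
      (PySem.List.enumerate words 0).foldl (fun best p =>
        if p.2 == target then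
          if best == -1 || min |p.1 - PySem.Int.mod startIndex (words.length : Int)|
              ((words.length : Int) - |p.1 - PySem.Int.mod startIndex (words.length : Int)|) < best then
            min |p.1 - PySem.Int.mod startIndex (words.length : Int)|
              ((words.length : Int) - |p.1 - PySem.Int.mod startIndex (words.length : Int)|)
          else best
        else best) (-1) := by
  have hb : -(words.length : Int) ≤ startIndex ∧ startIndex < (words.length : Int) := by
    simpa [PySem.Raise.InRange] using hpre
  set n : Int := (words.length : Int) with hn
  have hnpos : (0 : Int) < n := by omega
  set s : Int := PySem.Int.mod startIndex n with hsdef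
  have hs : s = startIndex % n := PySem.Int.mod_eq_emod_of_pos hnpos
  have hs0 : 0 ≤ s := by rw [hs]; exact Int.emod_nonneg _ (by omega)
  have hsn : s < n := by rw [hs]; exact Int.emod_lt_of_pos _ hnpos
  have hws : PySem.List.pyGet? words s = some x := by
    rw [hs, ← pv_pyGet_emod words startIndex hpre]
    exact hx
  have hpos : ∀ p ∈ PySem.List.enumerate words 0, p.2 = target → 0 ≤ pvDistB n s p.1 := by
    intro p hp _
    rcases (PySem.List.mem_enumerate_iff _ _ _).mp hp with ⟨k, hk, hpe⟩
    subst hpe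
    unfold pvDistB
    rcases abs_cases ((0 : Int) + (k : Int) - s) with ⟨ha, _⟩ | ⟨ha, _⟩ <;> rw [ha] <;> omega
  rw [closestTargetLoop_eq_find, pv_fold_min target n s _ hpos]
  rcases hmin : (pvDs target n s (PySem.List.enumerate words 0)).min? with _ | m
  · -- no target anywhere: both sides are -1
    have hds : pvDs target n s (PySem.List.enumerate words 0) = [] := by
      rcases hl : pvDs target n s (PySem.List.enumerate words 0) with _ | ⟨d, t⟩
      · rfl
      · rw [hl, List.min?_cons'] at hmin; cases hmin
    have hnone : (PySem.List.pyRange 1 n 1).find? (fun i =>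
        PySem.List.pyGet? words (PySem.Int.mod (startIndex - i + n) n) == some target
          || PySem.List.pyGet? words (PySem.Int.mod (startIndex + i) n) == some target) = none := by
      rw [List.find?_eq_none]
      intro i hi hhit
      rcases (PySem.List.mem_pyRange_one).mp hi with ⟨hi1, hin⟩
      rcases (pv_hit_iff words target startIndex n s i hn hnpos hs).mp hhit with
        ⟨k, hk0, hkn, hkt, _⟩
      have hmem : pvDistB n s k ∈ pvDs target n s (PySem.List.enumerate words 0) :=
        (pv_mem_ds words target n s _ hn).mpr ⟨k, hk0, hkn, hkt, rfl⟩
      rw [hds] at hmem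
      cases hmem
    rw [hnone]
  · -- some target exists: both sides are the minimal circular distance m
    have hmm := (List.min?_eq_some_iff).mp hmin
    rcases (pv_mem_ds words target n s m hn).mp hmm.1 with ⟨k0, hk00, hk0n, hk0t, hk0d⟩
    have hk0s : k0 ≠ s := by
      intro hcc
      rw [hcc, hws] at hk0t
      exact hxt (Option.some.inj hk0t)
    have hm1 : 1 ≤ m ∧ m ≤ n - m := by
      unfold pvDistB at hk0d
      rcases abs_cases (k0 - s) with ⟨ha, _⟩ | ⟨ha, _⟩ <;> rw [ha] at hk0d <;> omega
    have hmn : m < n := by omega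
    have hfind : (PySem.List.pyRange 1 n 1).find? (fun i =>
        PySem.List.pyGet? words (PySem.Int.mod (startIndex - i + n) n) == some target
          || PySem.List.pyGet? words (PySem.Int.mod (startIndex + i) n) == some target) = some m := by
      apply pv_find_sorted _ m (PySem.List.pairwise_lt_pyRange_one ..)
        ((PySem.List.mem_pyRange_one).mpr ⟨hm1.1, hmn⟩)
      · apply (pv_hit_iff words target startIndex n s m hn hnpos hs).mpr
        refine ⟨k0, hk00, hk0n, hk0t, ?_⟩
        apply (pv_dist_eq n s k0 m hnpos hs0 hsn hk00 hk0n hm1.1 hmn).mpr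
        rw [← hk0d]
        omega
      · intro i hi hilt
        rcases (PySem.List.mem_pyRange_one).mp hi with ⟨hi1, hin⟩
        by_contra hcon
        rw [Bool.not_eq_false] at hcon
        rcases (pv_hit_iff words target startIndex n s i hn hnpos hs).mp hcon with
          ⟨k, hk0', hkn', hkt', hkd'⟩
        have hdm : pvDistB n s k = min i (n - i) :=
          (pv_dist_eq n s k i hnpos hs0 hsn hk0' hkn' hi1 hin).mp hkd'
        have hmem : pvDistB n s k ∈ pvDs target n s (PySem.List.enumerate words 0) :=
          (pv_mem_ds words target n s _ hn).mpr ⟨k, hk0', hkn', hkt', rfl⟩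
        have hle := hmm.2 _ hmem
        omega
    rw [hfind]

-- ===== VERDICT (by name: the statement is the Claim_ definition above) =====
theorem closestTarget_spec : Claim_equal_closestTarget := by
  intro words target startIndex _ hpre
  unfold Spec_closestTarget closestTarget closestTarget_alt
  have hpre' : PySem.Raise.InRange words.length startIndex := hpre
  have hin : PySem.List.pyGet? words startIndex ≠ none := by
    rw [Ne, PySem.List.pyGet?_eq_none_iff]
    simpa using hpre'
  obtain ⟨x, hx⟩ := Option.ne_none_iff_exists'.mp hin
  by_cases hxt : x = target
  · simp only [hx, hxt, beq_self_eq_true, if_true]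
  · have hxt' : (x == target) = false := by simpa using hxt
    simp only [hx, hxt', Bool.false_eq_true, if_false]
    exact closestTarget_main words target startIndex x hx hxt hpre'
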